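-- pv_equiv track=rewrite | github.com/p-seonggeun/algorithm | 프로그래머스/3/389481. 봉인된 주문/봉인된 주문.py | solution
-- ===== SOURCE A (Python) =====
-- def solution(n, bans):
--     nums = []
--     for i in bans:
--         t = 0
--         for index, j in enumerate(i):
--             t += (26 ** (len(i) - 1 - index)) * (ord(j) - 97 + 1)
--         nums.append(t)
--     nums.sort()
--
--     for i in nums:
--         if n >= i:
--             n += 1
--         else:
--             break
--
--     answer = ""
--     while n > 0:
--         n -= 1
--         answer = chr(97 + (n % 26)) + answer
--         n //= 26
--
--     return answer
-- ===== SOURCE B (Python) =====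
-- def _decode(m):
--     if m <= 0:
--         return ""
--     return _decode((m - 1) // 26) + chr(97 + (m - 1) % 26)
--
--
-- def solution(n, bans):
--     nums = []
--     for s in bans:
--         t = 0
--         for ch in s:
--             t = t * 26 + (ord(ch) - 96)
--         nums.append(t)
--     m = n
--     while True:
--         m2 = n + sum(1 for b in nums if b <= m)
--         if m2 == m:
--             break
--         m = m2
--     return _decode(m)
-- ===== Notes on version B (the rewrite author's own statement) =====
-- stated objective: alternative
-- what changed: Encoding uses Horner's rule instead of per-position powers, the sort plus single adjusting pass is replaced by a sort-free fixpoint iteration m = n + #{b in nums : b <= m}, and the decoding while-loop becomes a recursive decoder.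
import Mathlib
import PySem

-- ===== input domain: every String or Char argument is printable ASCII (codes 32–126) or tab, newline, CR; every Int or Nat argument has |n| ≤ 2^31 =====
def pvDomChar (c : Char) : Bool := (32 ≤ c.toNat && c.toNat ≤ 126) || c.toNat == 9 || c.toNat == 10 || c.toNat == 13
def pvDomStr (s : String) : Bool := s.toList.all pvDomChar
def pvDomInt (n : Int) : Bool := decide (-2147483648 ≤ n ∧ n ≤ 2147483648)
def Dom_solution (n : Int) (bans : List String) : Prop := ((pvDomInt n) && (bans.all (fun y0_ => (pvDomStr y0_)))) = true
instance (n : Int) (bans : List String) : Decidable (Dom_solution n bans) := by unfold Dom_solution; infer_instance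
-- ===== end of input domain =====

-- B replaces A's sort + single adjusting pass by a sort-free fixpoint iteration
-- m = n + #{b in nums : b <= m}, Horner encoding, and a recursive decoder (alternative).

-- ===== PORT A =====

-- inner loop: t += 26 ** (len(i) - 1 - index) * (ord(j) - 97 + 1); within enumerate the
-- exponent len(i) - 1 - index is ≥ 0, so the Nat subtraction is exact
def encA (s : String) : Int :=
  (PySem.List.enumerate s.toList 0).foldl
    (fun t p => t + 26 ^ (s.toList.length - 1 - p.1.toNat) * ((p.2.toNat : Int) - 97 + 1)) 0

-- 'for i in nums: if n >= i: n += 1 else: break'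
def passA (n : Int) (s : List Int) : Int :=
  match s with
  | [] => n
  | i :: t => if n ≥ i then passA (n + 1) t else n

-- 'while n > 0: n -= 1; answer = chr(97 + (n % 26)) + answer; n //= 26'
-- (chr is exact here: the code point is 97..122); built as a List Char, returned as a String
def decA (n : Int) (acc : List Char) : List Char :=
  if h : 0 < n then
    decA (PySem.Int.floordiv (n - 1) 26)
      (Char.ofNat (97 + PySem.Int.mod (n - 1) 26).toNat :: acc)
  else acc
termination_by n.toNat
decreasing_by
  have h1 : PySem.Int.floordiv (n - 1) 26 = (n - 1) / 26 :=
    PySem.Int.floordiv_eq_ediv_of_pos (by omega)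
  have h2 : (n - 1) / 26 ≤ n - 1 := Int.ediv_le_self _ (by omega)
  have h3 : 0 ≤ (n - 1) / 26 := Int.ediv_nonneg (by omega) (by omega)
  simp only [h1]; omega

def solution (n : Int) (bans : List String) : String :=
  let nums := bans.foldl (fun acc i => acc ++ [encA i]) []
  let sortedNums := PySem.List.sorted nums (fun x => x) false
  String.ofList (decA (passA n sortedNums) [])

-- ===== PORT B =====

-- Horner: 'for ch in s: t = t * 26 + (ord(ch) - 96)'
def encB (s : String) : Int :=
  s.toList.foldl (fun t c => t * 26 + ((c.toNat : Int) - 96)) 0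

-- 'while True: m2 = n + sum(1 for b in nums if b <= m); if m2 == m: break; m = m2'
-- sum(1 for …) is a countP; the fuel nums.length + 1 always suffices (proved below: the
-- iteration increases m by ≥ 1 per step, is bounded by passA's result, and stops there)
def fixB (n : Int) (nums : List Int) : Nat → Int → Int
  | 0, m => m
  | fuel + 1, m =>
      let m2 := n + (nums.countP (fun b => b ≤ m) : Int)
      if m2 = m then m else fixB n nums fuel m2

-- recursive decoder: _decode(m) = "" if m <= 0 else _decode((m-1)//26) + chr(97 + (m-1)%26)
def decB (m : Int) : List Char :=
  if _h : m ≤ 0 then []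
  else decB (PySem.Int.floordiv (m - 1) 26) ++ [Char.ofNat (97 + PySem.Int.mod (m - 1) 26).toNat]
termination_by m.toNat
decreasing_by
  have h1 : PySem.Int.floordiv (m - 1) 26 = (m - 1) / 26 :=
    PySem.Int.floordiv_eq_ediv_of_pos (by omega)
  have h2 : (m - 1) / 26 ≤ m - 1 := Int.ediv_le_self _ (by omega)
  have h3 : 0 ≤ (m - 1) / 26 := Int.ediv_nonneg (by omega) (by omega)
  simp only [h1]; omega

def solution_alt (n : Int) (bans : List String) : String :=
  let nums := bans.foldl (fun acc s => acc ++ [encB s]) []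
  String.ofList (decB (fixB n nums (nums.length + 1) n))

-- ===== PRECONDITION & SPEC =====
def Spec_solution (n : Int) (bans : List String) (out : String) : Prop := out = solution_alt n bans
instance (n : Int) (bans : List String) (out : String) : Decidable (Spec_solution n bans out) := by unfold Spec_solution; infer_instance

-- ===== CLAIM (what is proved, stated in full; the proofs are below) =====
def Claim_equal_solution : Prop := ∀ (n : Int) (bans : List String), Dom_solution n bans → Spec_solution n bans (solution n bans)

-- ===== LEMMAS AND PROOFS =====

-- Horner fold with an arbitrary accumulator
theorem encB_fold (l : List Char) (a : Int) :
    l.foldl (fun t c => t * 26 + ((c.toNat : Int) - 96)) a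
      = a * 26 ^ l.length + l.foldl (fun t c => t * 26 + ((c.toNat : Int) - 96)) 0 := by
  induction l generalizing a with
  | nil => simp
  | cons c t ih =>
    simp only [List.foldl_cons, List.length_cons]
    rw [ih (a * 26 + _), ih (0 * 26 + _)]
    ring

-- A's positional-power fold equals 26^(slack) times the Horner value
theorem encA_general (l : List Char) (s L : Nat) (a : Int) (h : s + l.length ≤ L) :
    (PySem.List.enumerate l (s : Int)).foldl
        (fun t p => t + 26 ^ (L - 1 - p.1.toNat) * ((p.2.toNat : Int) - 97 + 1)) a
      = a + 26 ^ (L - s - l.length) * l.foldl (fun t c => t * 26 + ((c.toNat : Int) - 96)) 0 := by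
  induction l generalizing s a with
  | nil => simp [PySem.List.enumerate_nil]
  | cons c t ih =>
    rw [PySem.List.enumerate_cons, List.foldl_cons]
    have hs : (s : Int) + 1 = ((s + 1 : Nat) : Int) := by push_cast; ring
    rw [hs, ih (s + 1) _ (by simp at h ⊢; omega)]
    have e1 : (s : Int).toNat = s := by omega
    simp only [e1, List.length_cons] at *
    have e2 : L - 1 - s = (L - (s + 1) - t.length) + t.length := by omega
    have e3 : L - s - (t.length + 1) = L - (s + 1) - t.length := by omega
    have hR : (c :: t).foldl (fun t c => t * 26 + ((c.toNat : Int) - 96)) 0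
        = ((c.toNat : Int) - 96) * 26 ^ t.length
            + t.foldl (fun t c => t * 26 + ((c.toNat : Int) - 96)) 0 := by
      rw [List.foldl_cons, encB_fold]; ring
    rw [hR, e2, e3, pow_add]
    ring

theorem enc_eq (s : String) : encA s = encB s := by
  unfold encA encB
  have h := encA_general s.toList 0 s.toList.length 0 (by omega)
  simpa using h

theorem passA_ge (s : List Int) (n : Int) : n ≤ passA n s := by
  induction s generalizing n with
  | nil => simp [passA]
  | cons i t ih =>
    simp only [passA]
    split
    · exact le_trans (by omega) (ih (n + 1))
    · exact le_rfl

-- the pass result is a fixpoint: #{b ≤ P} = P - n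
theorem passA_count (s : List Int) (hs : s.Pairwise (· ≤ ·)) (n : Int) :
    (s.countP (fun b => b ≤ passA n s) : Int) = passA n s - n := by
  induction s generalizing n with
  | nil => simp [passA]
  | cons i t ih =>
    rcases List.pairwise_cons.mp hs with ⟨hp, ht⟩
    by_cases hni : n ≥ i
    · have hpass : passA n (i :: t) = passA (n + 1) t := by simp [passA, hni]
      have hge : n + 1 ≤ passA (n + 1) t := passA_ge t (n + 1)
      have hd : i ≤ passA (n + 1) t := by omega
      have iht := ih ht (n + 1)
      rw [hpass]
      simp only [List.countP_cons, hd, decide_true, if_true]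
      push_cast
      omega
    · have hpass : passA n (i :: t) = n := by simp [passA, hni]
      rw [hpass]
      have hc : (i :: t).countP (fun b => b ≤ n) = 0 := by
        rw [List.countP_eq_zero]
        intro x hx
        simp only [decide_eq_true_eq]
        rcases List.mem_cons.mp hx with rfl | hx
        · omega
        · have := hp x hx; omega
      rw [hc]; omega

-- the pass result is the least fixpoint ≥ n
theorem passA_least (s : List Int) (hs : s.Pairwise (· ≤ ·)) (n m : Int)
    (h1 : n ≤ m) (h2 : (s.countP (fun b => b ≤ m) : Int) = m - n) : passA n s ≤ m := by
  induction s generalizing n with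
  | nil => simpa [passA] using h1
  | cons i t ih =>
    rcases List.pairwise_cons.mp hs with ⟨hp, ht⟩
    by_cases hni : n ≥ i
    · have hpass : passA n (i :: t) = passA (n + 1) t := by simp [passA, hni]
      have hd : i ≤ m := by omega
      simp only [List.countP_cons, hd, decide_true, if_true] at h2
      push_cast at h2
      have hnn : (0 : Int) ≤ (t.countP (fun b => b ≤ m) : Int) := Int.natCast_nonneg _
      rw [hpass]
      exact ih ht (n + 1) (by omega) (by omega)
    · have hpass : passA n (i :: t) = n := by simp [passA, hni]
      omega

-- below the pass result the count dominates m - n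
theorem passA_count_ge (s : List Int) (hs : s.Pairwise (· ≤ ·)) (n m : Int)
    (h1 : n ≤ m) (h2 : m ≤ passA n s) : m - n ≤ (s.countP (fun b => b ≤ m) : Int) := by
  induction s generalizing n with
  | nil => simp [passA] at h2; omega
  | cons i t ih =>
    rcases List.pairwise_cons.mp hs with ⟨hp, ht⟩
    have hnn : (0 : Int) ≤ ((i :: t).countP (fun b => b ≤ m) : Int) := Int.natCast_nonneg _
    by_cases hni : n ≥ i
    · have hpass : passA n (i :: t) = passA (n + 1) t := by simp [passA, hni]
      rw [hpass] at h2
      have hd : i ≤ m := by omega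
      simp only [List.countP_cons, hd, decide_true, if_true]
      by_cases hm : n + 1 ≤ m
      · have := ih ht (n + 1) hm h2
        push_cast
        omega
      · have hnn2 : (0 : Int) ≤ (t.countP (fun b => b ≤ m) : Int) := Int.natCast_nonneg _
        push_cast
        omega
    · have hpass : passA n (i :: t) = n := by simp [passA, hni]
      rw [hpass] at h2
      omega

theorem fixB_succ (n : Int) (nums : List Int) (fuel : Nat) (m : Int) :
    fixB n nums (fuel + 1) m
      = if n + (nums.countP (fun b => b ≤ m) : Int) = m then m
        else fixB n nums fuel (n + (nums.countP (fun b => b ≤ m) : Int)) := rfl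

-- the fixpoint iteration reaches exactly the pass result on the sorted list
theorem fixB_eq (nums : List Int) (n : Int) (fuel : Nat) (m : Int)
    (h1 : n ≤ m) (h2 : m ≤ passA n (PySem.List.sorted nums (fun x => x) false))
    (h3 : passA n (PySem.List.sorted nums (fun x => x) false) - m ≤ (fuel : Int)) :
    fixB n nums fuel m = passA n (PySem.List.sorted nums (fun x => x) false) := by
  set s := PySem.List.sorted nums (fun x => x) false with hsdef
  have hperm : s.Perm nums := PySem.List.sorted_perm nums (fun x => x) false
  have hs : s.Pairwise (· ≤ ·) := by
    have := PySem.List.sorted_pairwise nums (fun x => x)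
    simpa using this
  suffices H : ∀ (fuel : Nat) (m : Int), n ≤ m → m ≤ passA n s → passA n s - m ≤ (fuel : Int) →
      fixB n nums fuel m = passA n s from H fuel m h1 h2 h3
  intro fuel
  induction fuel with
  | zero => intro m a b c; simp only [fixB]; push_cast at c; omega
  | succ fuel ih =>
    intro m hm1 hm2 hm3
    rw [fixB_succ]
    have hcnt : nums.countP (fun b => b ≤ m) = s.countP (fun b => b ≤ m) :=
      (hperm.countP_eq _).symm
    have hP : (s.countP (fun b => b ≤ passA n s) : Int) = passA n s - n := passA_count s hs n
    have hmono : s.countP (fun b => b ≤ m) ≤ s.countP (fun b => b ≤ passA n s) := by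
      apply List.countP_mono_left
      intro x _ hx
      simp only [decide_eq_true_eq] at hx ⊢
      omega
    have hge : m - n ≤ (s.countP (fun b => b ≤ m) : Int) := passA_count_ge s hs n m hm1 hm2
    by_cases hfix : n + (nums.countP (fun b => b ≤ m) : Int) = m
    · rw [if_pos hfix]
      rw [hcnt] at hfix
      have : passA n s ≤ m := passA_least s hs n m hm1 (by omega)
      omega
    · rw [if_neg hfix]
      have hub : n + (nums.countP (fun b => b ≤ m) : Int) ≤ passA n s := by
        rw [hcnt]; omega
      have hlb : m + 1 ≤ n + (nums.countP (fun b => b ≤ m) : Int) := by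
        rw [hcnt]; omega
      exact ih (n + (nums.countP (fun b => b ≤ m) : Int)) (by omega) hub
        (by push_cast at hm3 ⊢; omega)

-- the accumulating while-loop decoder equals the recursive decoder
theorem dec_eq (n : Int) (acc : List Char) : decA n acc = decB n ++ acc := by
  induction n, acc using decA.induct with
  | case1 n acc h ih =>
    rw [decA, dif_pos h, ih]
    conv_rhs => rw [decB, dif_neg (show ¬ n ≤ 0 by omega)]
    simp
  | case2 n acc h =>
    rw [decA, dif_neg h, decB, dif_pos (by omega : n ≤ 0)]
    simp

-- ===== VERDICT (by name: the statement is the Claim_ definition above) =====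
theorem solution_spec : Claim_equal_solution := by
  intro n bans _
  simp only [Spec_solution, solution, solution_alt]
  have hnums : bans.foldl (fun acc s => acc ++ [encB s]) []
      = bans.foldl (fun acc i => acc ++ [encA i]) [] := by
    rw [PySem.List.foldl_append_singleton_eq_map, PySem.List.foldl_append_singleton_eq_map]
    exact (List.map_congr_left fun s _ => (enc_eq s).symm)
  rw [hnums]
  set nums := bans.foldl (fun acc i => acc ++ [encA i]) [] with hn
  set s := PySem.List.sorted nums (fun x => x) false with hsdef
  have hperm : s.Perm nums := PySem.List.sorted_perm nums (fun x => x) false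
  have hs : s.Pairwise (· ≤ ·) := by
    have := PySem.List.sorted_pairwise nums (fun x => x)
    simpa using this
  have hP := passA_count s hs n
  have hlen : s.length = nums.length := hperm.length_eq
  have hcle : s.countP (fun b => b ≤ passA n s) ≤ s.length := List.countP_le_length
  have hfix : fixB n nums (nums.length + 1) n = passA n s := by
    apply fixB_eq nums n (nums.length + 1) n le_rfl (passA_ge s n)
    rw [← hsdef]
    push_cast
    omega
  rw [hfix, dec_eq (passA n s) []]
  simp
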